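-- pv_equiv track=rewrite | github.com/sbarczyk/WDI | Pycharm/Kolokwia/Kolokwium - 1/kol_22_23_zad_B1.py | spr
-- ===== SOURCE A (Python) =====
-- def spr(T):
--     l = len(T)
--     max_beg = -float('inf')
--     min_end = float('inf')
--     cur_seq = 1
--
--     for i in range(1, l):
--         if T[i - 1] < T[i]:
--             cur_seq += 1
--         elif cur_seq > 2:
--             if T[i - 1] < min_end:
--                 min_end = T[i - 1]
--             if T[i - cur_seq] > max_beg:
--                 max_beg = T[i - cur_seq]
--             cur_seq = 1
--         else:
--             cur_seq = 1
--
--     if cur_seq > 2: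
--         if T[l - 1] < min_end:
--             min_end = T[l - 1]
--         if T[l - cur_seq] > max_beg:
--             max_beg = T[l - cur_seq]
--         cur_seq = 1
--
--     return max_beg > min_end
-- ===== SOURCE B (Python) =====
-- def spr(T):
--     n = len(T)
--
--     def is_start(i):
--         return (i + 2 < n
--                 and (i == 0 or T[i - 1] >= T[i])
--                 and T[i] < T[i + 1] < T[i + 2])
--
--     def is_end(i):
--         return (i >= 2
--                 and T[i - 2] < T[i - 1] < T[i]
--                 and (i == n - 1 or T[i] >= T[i + 1]))
--
--     starts = [T[i] for i in range(n) if is_start(i)]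
--     ends = [T[i] for i in range(n) if is_end(i)]
--     return bool(starts) and bool(ends) and max(starts) > min(ends)
-- ===== Notes on version B (the rewrite author's own statement) =====
-- stated objective: alternative
-- what changed: B drops A's stateful run-length counter and running +/-inf extremes entirely: it classifies each index by a stateless local window predicate (run-start iff left-maximal and the next two steps ascend; run-end iff the previous two steps ascend and right-maximal), collects those values by two range filters, and compares max of starts with min of ends.
import Mathlib
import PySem

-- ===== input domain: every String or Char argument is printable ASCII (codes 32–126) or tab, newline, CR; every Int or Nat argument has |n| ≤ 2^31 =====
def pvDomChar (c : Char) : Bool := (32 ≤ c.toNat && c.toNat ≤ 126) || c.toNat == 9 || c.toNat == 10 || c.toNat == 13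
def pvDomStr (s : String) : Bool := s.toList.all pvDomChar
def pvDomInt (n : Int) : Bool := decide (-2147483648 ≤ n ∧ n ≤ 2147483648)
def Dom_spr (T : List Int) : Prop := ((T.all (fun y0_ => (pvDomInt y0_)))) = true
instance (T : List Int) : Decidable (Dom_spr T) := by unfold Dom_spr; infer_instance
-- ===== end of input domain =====

-- B replaces A's stateful run-length counter and running ±inf extremes by stateless local
-- 3-window predicates per index (run-start / run-end) and two range filters; same O(n) cost
-- (objective: alternative).

-- ===== PORT A =====
-- max_beg = -inf is modelled as (none : Option Int), min_end = +inf as none; the final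
-- 'max_beg > min_end' is false whenever either is still infinite, exactly as the match below.
def sprStep (T : List Int) (s : Option Int × Option Int × Int) (i : Int) :
    Option Int × Option Int × Int :=
  match s with
  | (mb, me, cur) =>
    if PySem.List.pyGetD T (i - 1) 0 < PySem.List.pyGetD T i 0 then (mb, me, cur + 1)
    else if cur > 2 then
      let me' := if (match me with
                     | none => true
                     | some b => decide (PySem.List.pyGetD T (i - 1) 0 < b)) then
                   some (PySem.List.pyGetD T (i - 1) 0) else me
      let mb' := if (match mb with
                     | none => true
                     | some a => decide (PySem.List.pyGetD T (i - cur) 0 > a)) then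
                   some (PySem.List.pyGetD T (i - cur) 0) else mb
      (mb', me', 1)
    else (mb, me, 1)

def sprFinish (T : List Int) (s : Option Int × Option Int × Int) : Bool :=
  match s with
  | (mb, me, cur) =>
    let l : Int := T.length
    let p := if cur > 2 then
        (let me' := if (match me with
                        | none => true
                        | some b => decide (PySem.List.pyGetD T (l - 1) 0 < b)) then
                      some (PySem.List.pyGetD T (l - 1) 0) else me
         let mb' := if (match mb with
                        | none => true
                        | some a => decide (PySem.List.pyGetD T (l - cur) 0 > a)) then
                      some (PySem.List.pyGetD T (l - cur) 0) else mb
         (mb', me'))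
      else (mb, me)
    match p with
    | (some a, some b) => decide (a > b)
    | _ => false

def spr (T : List Int) : Bool :=
  sprFinish T ((PySem.List.pyRange 1 (T.length : Int) 1).foldl (sprStep T) (none, none, 1))

-- ===== PORT B =====
-- is_start(i): i is the first index of a maximal strictly-ascending run of length ≥ 3
def sprAltIsStart (T : List Int) (n i : Int) : Bool :=
  decide (i + 2 < n) &&
  (i == 0 || decide (PySem.List.pyGetD T (i - 1) 0 ≥ PySem.List.pyGetD T i 0)) &&
  decide (PySem.List.pyGetD T i 0 < PySem.List.pyGetD T (i + 1) 0) &&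
  decide (PySem.List.pyGetD T (i + 1) 0 < PySem.List.pyGetD T (i + 2) 0)

-- is_end(i): i is the last index of a maximal strictly-ascending run of length ≥ 3
def sprAltIsEnd (T : List Int) (n i : Int) : Bool :=
  decide (i ≥ 2) &&
  decide (PySem.List.pyGetD T (i - 2) 0 < PySem.List.pyGetD T (i - 1) 0) &&
  decide (PySem.List.pyGetD T (i - 1) 0 < PySem.List.pyGetD T i 0) &&
  (i == n - 1 || decide (PySem.List.pyGetD T i 0 ≥ PySem.List.pyGetD T (i + 1) 0))

def spr_alt (T : List Int) : Bool :=
  let n : Int := T.length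
  let starts := ((PySem.List.pyRange 0 n 1).filter (sprAltIsStart T n)).map
      (fun i => PySem.List.pyGetD T i 0)
  let ends := ((PySem.List.pyRange 0 n 1).filter (sprAltIsEnd T n)).map
      (fun i => PySem.List.pyGetD T i 0)
  !starts.isEmpty && !ends.isEmpty &&
    (match PySem.List.max? starts id, PySem.List.min? ends id with
     | some a, some b => decide (a > b)
     | _, _ => false)

-- ===== PRECONDITION & SPEC =====
def Spec_spr (T : List Int) (out : Bool) : Prop := out = spr_alt T
instance (T : List Int) (out : Bool) : Decidable (Spec_spr T out) := by unfold Spec_spr; infer_instance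

-- ===== CLAIM (what is proved, stated in full; the proofs are below) =====
def Claim_equal_spr : Prop := ∀ (T : List Int), Dom_spr T → Spec_spr T (spr T)

-- ===== LEMMAS AND PROOFS =====

-- the maximal strictly-ascending runs of length ≥ 3 of (prefix-state st pv ln) ++ rest,
-- as (first, last) pairs — the common ground both ports are reduced to
def pvRuns : List Int → Int → Int → Nat → List (Int × Int)
  | [], st, pv, ln => if 3 ≤ ln then [(st, pv)] else []
  | x :: xs, st, pv, ln =>
      if pv < x then pvRuns xs st x (ln + 1)
      else (if 3 ≤ ln then [(st, pv)] else []) ++ pvRuns xs x x 1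

def maxStarts (rs : List (Int × Int)) : Option Int := PySem.List.max? (rs.map Prod.fst) id
def minEnds (rs : List (Int × Int)) : Option Int := PySem.List.min? (rs.map Prod.snd) id

def cmpRuns (rs : List (Int × Int)) : Bool :=
  match (maxStarts rs, minEnds rs) with
  | (some a, some b) => decide (b < a)
  | _ => false

def mstep (acc : Option Int) (x : Int) : Option Int :=
  match acc with | none => some x | some m => if m < x then some x else some m
def nstep (acc : Option Int) (x : Int) : Option Int :=
  match acc with | none => some x | some m => if x < m then some x else some m

lemma maxStarts_eq (rs : List (Int × Int)) :
    maxStarts rs = (rs.map Prod.fst).foldl mstep none := by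
  unfold maxStarts PySem.List.max?
  congr 1
  funext acc x
  cases acc <;> simp [mstep]

lemma minEnds_eq (rs : List (Int × Int)) :
    minEnds rs = (rs.map Prod.snd).foldl nstep none := by
  unfold minEnds PySem.List.min?
  congr 1
  funext acc x
  cases acc <;> simp [nstep]

lemma maxStarts_append (rs : List (Int × Int)) (a b : Int) :
    (if (match maxStarts rs with
         | none => true
         | some m => decide (m < a)) then some a else maxStarts rs)
      = maxStarts (rs ++ [(a, b)]) := by
  rw [maxStarts_eq, maxStarts_eq]
  simp only [List.map_append, List.foldl_append, List.map_cons, List.map_nil,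
    List.foldl_cons, List.foldl_nil]
  generalize (rs.map Prod.fst).foldl mstep none = q
  cases q with
  | none => rfl
  | some m => by_cases h : m < a <;> simp [mstep, h]

lemma minEnds_append (rs : List (Int × Int)) (a b : Int) :
    (if (match minEnds rs with
         | none => true
         | some m => decide (b < m)) then some b else minEnds rs)
      = minEnds (rs ++ [(a, b)]) := by
  rw [minEnds_eq, minEnds_eq]
  simp only [List.map_append, List.foldl_append, List.map_cons, List.map_nil,
    List.foldl_cons, List.foldl_nil]
  generalize (rs.map Prod.snd).foldl nstep none = q
  cases q with
  | none => rfl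
  | some m => by_cases h : b < m <;> simp [nstep, h]

-- ===== A reduced to pvRuns =====
lemma spr_main (T : List Int) :
    ∀ (k i ln : Nat) (st pv : Int) (rs : List (Int × Int)),
      i + k = T.length → 1 ≤ ln → ln ≤ i →
      T.getD (i - 1) 0 = pv → T.getD (i - ln) 0 = st →
      sprFinish T ((PySem.List.pyRange (i : Int) (T.length : Int) 1).foldl (sprStep T)
          (maxStarts rs, minEnds rs, (ln : Int)))
        = cmpRuns (rs ++ pvRuns (T.drop i) st pv ln) := by
  intro k
  induction k with
  | zero =>
    intro i ln st pv rs hik h1 hli hpv hst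
    have hi : i = T.length := by omega
    subst hi
    rw [PySem.List.pyRange_one_eq_nil (le_refl _), List.drop_length]
    simp only [List.foldl_nil]
    have hg1 : PySem.List.pyGetD T ((T.length : Int) - 1) 0 = pv := by
      have he : ((T.length : Int) - 1) = ((T.length - 1 : Nat) : Int) := by omega
      rw [he, PySem.List.pyGetD_natCast, hpv]
    have hgl : PySem.List.pyGetD T ((T.length : Int) - (ln : Int)) 0 = st := by
      have he : ((T.length : Int) - (ln : Int)) = ((T.length - ln : Nat) : Int) := by omega
      rw [he, PySem.List.pyGetD_natCast, hst]
    by_cases h3 : 3 ≤ ln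
    · have hc : ((2 : Int) < (ln : Int)) := by exact_mod_cast (by omega : 2 < ln)
      simp only [sprFinish, pvRuns, hg1, hgl, gt_iff_lt, hc, h3, if_true]
      rw [maxStarts_append rs st pv, minEnds_append rs st pv]
      rfl
    · have hc : ¬ ((2 : Int) < (ln : Int)) := by omega
      simp only [sprFinish, pvRuns, gt_iff_lt, hc, h3, if_false]
      simp only [List.append_nil]
      rfl
  | succ k ih =>
    intro i ln st pv rs hik h1 hli hpv hst
    have hilt : i < T.length := by omega
    have hdrop : T.drop i = T[i] :: T.drop (i + 1) := List.drop_eq_getElem_cons hilt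
    have hgdi : T.getD i 0 = T[i] := by
      rw [List.getD_eq_getElem?_getD, List.getElem?_eq_getElem hilt, Option.getD_some]
    have hg1 : PySem.List.pyGetD T ((i : Int) - 1) 0 = pv := by
      have he : ((i : Int) - 1) = ((i - 1 : Nat) : Int) := by omega
      rw [he, PySem.List.pyGetD_natCast, hpv]
    have hg0 : PySem.List.pyGetD T (i : Int) 0 = T[i] := by
      rw [PySem.List.pyGetD_natCast, hgdi]
    have hgl : PySem.List.pyGetD T ((i : Int) - (ln : Int)) 0 = st := by
      have he : ((i : Int) - (ln : Int)) = ((i - ln : Nat) : Int) := by omega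
      rw [he, PySem.List.pyGetD_natCast, hst]
    rw [PySem.List.pyRange_one_cons (by exact_mod_cast hilt), hdrop]
    simp only [List.foldl_cons]
    by_cases hlt : pv < T[i]
    · have hA : sprStep T (maxStarts rs, minEnds rs, (ln : Int)) (i : Int)
          = (maxStarts rs, minEnds rs, ((ln + 1 : Nat) : Int)) := by
        simp only [sprStep, hg1, hg0, hlt, if_true]
        push_cast
        rfl
      rw [hA, show pvRuns (T[i] :: T.drop (i + 1)) st pv ln = pvRuns (T.drop (i + 1)) st T[i] (ln + 1) by
        simp [pvRuns, hlt]]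
      have := ih (i + 1) (ln + 1) st T[i] rs (by omega) (by omega) (by omega)
        (by simpa using hgdi) (by simpa [Nat.succ_sub_succ] using hst)
      simpa using this
    · have hrunsEq : pvRuns (T[i] :: T.drop (i + 1)) st pv ln
          = (if 3 ≤ ln then [(st, pv)] else []) ++ pvRuns (T.drop (i + 1)) T[i] T[i] 1 := by
        simp [pvRuns, hlt]
      by_cases h3 : 3 ≤ ln
      · have hc : ((2 : Int) < (ln : Int)) := by omega
        have hA : sprStep T (maxStarts rs, minEnds rs, (ln : Int)) (i : Int)
            = (maxStarts (rs ++ [(st, pv)]), minEnds (rs ++ [(st, pv)]), ((1 : Nat) : Int)) := by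
          simp only [sprStep, hg1, hg0, hlt, hgl, gt_iff_lt, hc, ite_true, if_false, Nat.cast_one]
          rw [minEnds_append rs st pv, maxStarts_append rs st pv]
        rw [hA, hrunsEq, if_pos h3, ← List.append_assoc]
        have := ih (i + 1) 1 T[i] T[i] (rs ++ [(st, pv)]) (by omega) (by omega) (by omega)
          (by simpa using hgdi) (by simpa using hgdi)
        simpa using this
      · have hc : ¬ ((2 : Int) < (ln : Int)) := by omega
        have hA : sprStep T (maxStarts rs, minEnds rs, (ln : Int)) (i : Int)
            = (maxStarts rs, minEnds rs, ((1 : Nat) : Int)) := by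
          simp only [sprStep, hg1, hg0, hlt, gt_iff_lt, hc, ite_false, Nat.cast_one]
        rw [hA, hrunsEq, if_neg h3, List.nil_append]
        have := ih (i + 1) 1 T[i] T[i] rs (by omega) (by omega) (by omega)
          (by simpa using hgdi) (by simpa using hgdi)
        simpa using this

-- ===== B reduced to pvRuns =====

-- Nat-level readings of B's two window predicates
def natStart (T : List Int) (m : Nat) : Bool :=
  decide (m + 2 < T.length) &&
  ((m == 0) || decide (T.getD m 0 ≤ T.getD (m - 1) 0)) &&
  decide (T.getD m 0 < T.getD (m + 1) 0) &&
  decide (T.getD (m + 1) 0 < T.getD (m + 2) 0)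

def natEnd (T : List Int) (m : Nat) : Bool :=
  decide (2 ≤ m) &&
  decide (T.getD (m - 2) 0 < T.getD (m - 1) 0) &&
  decide (T.getD (m - 1) 0 < T.getD m 0) &&
  ((m + 1 == T.length) || decide (T.getD (m + 1) 0 ≤ T.getD m 0))

lemma isStart_eval (T : List Int) (m : Nat) :
    sprAltIsStart T (T.length : Int) (m : Int) = natStart T m := by
  have h1 : ((m : Int) + 1) = ((m + 1 : Nat) : Int) := by push_cast; ring
  have h2 : ((m : Int) + 2) = ((m + 2 : Nat) : Int) := by push_cast; ring
  unfold sprAltIsStart natStart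
  rw [h1, h2]
  by_cases hm : m = 0
  · subst hm; simp [PySem.List.pyGetD_ofNat', List.getD_eq_getElem?_getD]
  · have hm1 : ((m : Int) - 1) = ((m - 1 : Nat) : Int) := by omega
    have hne : (((m : Int) == 0) : Bool) = false := by
      rw [beq_eq_false_iff_ne]; exact_mod_cast hm
    have hne' : ((m == 0) : Bool) = false := by simp [hm]
    rw [hm1]
    simp only [PySem.List.pyGetD_natCast, ge_iff_le, hne, hne', Bool.false_or, Nat.cast_lt]

lemma isEnd_eval (T : List Int) (m : Nat) :
    sprAltIsEnd T (T.length : Int) (m : Int) = natEnd T m := by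
  have h1 : ((m : Int) + 1) = ((m + 1 : Nat) : Int) := by push_cast; ring
  unfold sprAltIsEnd natEnd
  rw [h1]
  by_cases hm : 2 ≤ m
  · have hm1 : ((m : Int) - 1) = ((m - 1 : Nat) : Int) := by omega
    have hm2 : ((m : Int) - 2) = ((m - 2 : Nat) : Int) := by omega
    rw [hm1, hm2]
    simp only [PySem.List.pyGetD_natCast, ge_iff_le]
    have hb : ((m : Int) == (T.length : Int) - 1) = ((m + 1 : Nat) == T.length) := by
      by_cases he : (m : Int) = (T.length : Int) - 1
      · have he' : m + 1 = T.length := by omega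
        simp [he, he']
      · have he' : m + 1 ≠ T.length := by omega
        simp [he, he']
    rw [hb]
    have hd : decide ((m : Int) ≥ 2) = decide (2 ≤ m) := by
      simp only [ge_iff_le, decide_eq_decide]; omega
    rw [hd]
  · have hd : decide ((m : Int) ≥ 2) = false := by
      simp only [ge_iff_le, decide_eq_false_iff_not]; omega
    have hd' : decide (2 ≤ m) = false := by
      simp only [decide_eq_false_iff_not]; omega
    simp [hd']

-- filtering an Int range through a predicate that is everywhere/at-one-point true,
-- read through a Nat-level version Q
lemma filter_range_nil (a b : Nat) (P : Int → Bool) (Q : Nat → Bool)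
    (hPQ : ∀ m : Nat, P (m : Int) = Q m)
    (h : ∀ m : Nat, a ≤ m → m < b → Q m = false) :
    (PySem.List.pyRange (a : Int) (b : Int) 1).filter P = [] := by
  rw [List.filter_eq_nil_iff]
  intro x hx
  rw [PySem.List.mem_pyRange_one] at hx
  have hx0 : (0 : Int) ≤ x := le_trans (by exact_mod_cast Nat.zero_le a) hx.1
  have hxe : ((x.toNat : Nat) : Int) = x := Int.toNat_of_nonneg hx0
  rw [← hxe, hPQ, h x.toNat (by omega) (by omega)]
  simp

lemma filter_range_single (a b c : Nat) (P : Int → Bool) (Q : Nat → Bool)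
    (hPQ : ∀ m : Nat, P (m : Int) = Q m)
    (hac : a ≤ c) (hcb : c < b) (hc : Q c = true)
    (h : ∀ m : Nat, a ≤ m → m < b → m ≠ c → Q m = false) :
    (PySem.List.pyRange (a : Int) (b : Int) 1).filter P = [(c : Int)] := by
  rw [PySem.List.pyRange_one_append (a : Int) (c : Int) (b : Int)
      (by exact_mod_cast hac) (by exact_mod_cast le_of_lt hcb)]
  rw [show PySem.List.pyRange (c : Int) (b : Int) 1
        = (c : Int) :: PySem.List.pyRange ((c : Int) + 1) (b : Int) 1 from
      PySem.List.pyRange_one_cons (by exact_mod_cast hcb)]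
  have hc1 : ((c : Int) + 1) = ((c + 1 : Nat) : Int) := by push_cast; ring
  rw [List.filter_append, List.filter_cons]
  rw [filter_range_nil a c P Q hPQ (fun m hm1 hm2 => h m hm1 (by omega) (by omega))]
  rw [hc1, filter_range_nil (c + 1) b P Q hPQ (fun m hm1 hm2 => h m (by omega) hm2 (by omega))]
  rw [hPQ, hc]
  simp


-- small evaluation lemmas for the window predicates
lemma natStart_eq_true_iff (T : List Int) (m : Nat) :
    natStart T m = true ↔
      ((m + 2 < T.length ∧ (m = 0 ∨ T.getD m 0 ≤ T.getD (m - 1) 0)) ∧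
        T.getD m 0 < T.getD (m + 1) 0) ∧ T.getD (m + 1) 0 < T.getD (m + 2) 0 := by
  simp only [natStart, Bool.and_eq_true, Bool.or_eq_true, decide_eq_true_eq, beq_iff_eq]

lemma natEnd_eq_true_iff (T : List Int) (m : Nat) :
    natEnd T m = true ↔
      ((2 ≤ m ∧ T.getD (m - 2) 0 < T.getD (m - 1) 0) ∧
        T.getD (m - 1) 0 < T.getD m 0) ∧
        (m + 1 = T.length ∨ T.getD (m + 1) 0 ≤ T.getD m 0) := by
  simp only [natEnd, Bool.and_eq_true, Bool.or_eq_true, decide_eq_true_eq, beq_iff_eq]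

lemma natStart_true (T : List Int) (m : Nat)
    (h1 : m + 2 < T.length)
    (h2 : m = 0 ∨ T.getD m 0 ≤ T.getD (m - 1) 0)
    (h3 : T.getD m 0 < T.getD (m + 1) 0)
    (h4 : T.getD (m + 1) 0 < T.getD (m + 2) 0) : natStart T m = true :=
  (natStart_eq_true_iff T m).mpr ⟨⟨⟨h1, h2⟩, h3⟩, h4⟩

lemma natStart_false_of_len (T : List Int) (m : Nat)
    (h : ¬ m + 2 < T.length) : natStart T m = false := by
  rw [Bool.eq_false_iff]; intro hc
  exact h ((natStart_eq_true_iff T m).mp hc).1.1.1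

lemma natStart_false_of_asc (T : List Int) (m : Nat)
    (h0 : m ≠ 0) (h : T.getD (m - 1) 0 < T.getD m 0) : natStart T m = false := by
  rw [Bool.eq_false_iff]; intro hc
  rcases ((natStart_eq_true_iff T m).mp hc).1.1.2 with h' | h'
  · exact h0 h'
  · exact absurd h (not_lt.mpr h')

lemma natStart_false_of_flat1 (T : List Int) (m : Nat)
    (h : ¬ T.getD m 0 < T.getD (m + 1) 0) : natStart T m = false := by
  rw [Bool.eq_false_iff]; intro hc
  exact h ((natStart_eq_true_iff T m).mp hc).1.2

lemma natStart_false_of_flat2 (T : List Int) (m : Nat)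
    (h : ¬ T.getD (m + 1) 0 < T.getD (m + 2) 0) : natStart T m = false := by
  rw [Bool.eq_false_iff]; intro hc
  exact h ((natStart_eq_true_iff T m).mp hc).2

lemma natEnd_true (T : List Int) (m : Nat)
    (h1 : 2 ≤ m)
    (h2 : T.getD (m - 2) 0 < T.getD (m - 1) 0)
    (h3 : T.getD (m - 1) 0 < T.getD m 0)
    (h4 : m + 1 = T.length ∨ T.getD (m + 1) 0 ≤ T.getD m 0) : natEnd T m = true :=
  (natEnd_eq_true_iff T m).mpr ⟨⟨⟨h1, h2⟩, h3⟩, h4⟩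

lemma natEnd_false_of_small (T : List Int) (m : Nat)
    (h : m < 2) : natEnd T m = false := by
  rw [Bool.eq_false_iff]; intro hc
  exact absurd ((natEnd_eq_true_iff T m).mp hc).1.1.1 (by omega)

lemma natEnd_false_of_right (T : List Int) (m : Nat)
    (h1 : m + 1 ≠ T.length) (h2 : T.getD m 0 < T.getD (m + 1) 0) : natEnd T m = false := by
  rw [Bool.eq_false_iff]; intro hc
  rcases ((natEnd_eq_true_iff T m).mp hc).2 with h' | h'
  · exact h1 h'
  · exact absurd h2 (not_lt.mpr h')

lemma natEnd_false_of_mid (T : List Int) (m : Nat)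
    (h : ¬ T.getD (m - 1) 0 < T.getD m 0) : natEnd T m = false := by
  rw [Bool.eq_false_iff]; intro hc
  exact h ((natEnd_eq_true_iff T m).mp hc).1.2

lemma natEnd_false_of_left (T : List Int) (m : Nat)
    (h : ¬ T.getD (m - 2) 0 < T.getD (m - 1) 0) : natEnd T m = false := by
  rw [Bool.eq_false_iff]; intro hc
  exact h ((natEnd_eq_true_iff T m).mp hc).1.1.2

lemma map_get_single (T : List Int) (c : Nat) :
    ([((c : Nat) : Int)]).map (fun j => PySem.List.pyGetD T j 0) = [T.getD c 0] := by
  simp [PySem.List.pyGetD_natCast]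

lemma filt_main (T : List Int) :
    ∀ (k i ln : Nat), i + k = T.length → 1 ≤ ln → ln ≤ i →
      (∀ j : Nat, i - ln < j → j < i → T.getD (j - 1) 0 < T.getD j 0) →
      (i - ln = 0 ∨ T.getD (i - ln) 0 ≤ T.getD (i - ln - 1) 0) →
      (((PySem.List.pyRange ((i - ln : Nat) : Int) (T.length : Int) 1).filter
          (sprAltIsStart T (T.length : Int))).map (fun j => PySem.List.pyGetD T j 0)
         = (pvRuns (T.drop i) (T.getD (i - ln) 0) (T.getD (i - 1) 0) ln).map Prod.fst)
      ∧ (((PySem.List.pyRange ((i - ln : Nat) : Int) (T.length : Int) 1).filter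
          (sprAltIsEnd T (T.length : Int))).map (fun j => PySem.List.pyGetD T j 0)
         = (pvRuns (T.drop i) (T.getD (i - ln) 0) (T.getD (i - 1) 0) ln).map Prod.snd) := by
  intro k
  induction k with
  | zero =>
    intro i ln hik h1 hli hasc hlm
    have hi : i = T.length := by omega
    subst hi
    rw [List.drop_length]
    by_cases h3 : 3 ≤ ln
    · constructor
      · rw [filter_range_single (T.length - ln) T.length (T.length - ln)
            (sprAltIsStart T (T.length : Int)) (natStart T) (isStart_eval T)
            (le_refl _) (by omega)
            (natStart_true T _ (by omega) hlm
              (by have h := hasc (T.length - ln + 1) (by omega) (by omega)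
                  rwa [show T.length - ln + 1 - 1 = T.length - ln from by omega] at h)
              (by have h := hasc (T.length - ln + 2) (by omega) (by omega)
                  rwa [show T.length - ln + 2 - 1 = T.length - ln + 1 from by omega] at h))
            (fun m hm1 hm2 hm3 =>
              natStart_false_of_asc T m (by omega) (hasc m (by omega) hm2)),
          map_get_single]
        simp [pvRuns, h3]
      · rw [filter_range_single (T.length - ln) T.length (T.length - 1)
            (sprAltIsEnd T (T.length : Int)) (natEnd T) (isEnd_eval T)
            (by omega) (by omega)
            (natEnd_true T _ (by omega)
              (by have h := hasc (T.length - 2) (by omega) (by omega)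
                  rwa [show T.length - 2 - 1 = T.length - 1 - 2 from by omega,
                       show T.length - 2 = T.length - 1 - 1 from by omega] at h)
              (by have h := hasc (T.length - 1) (by omega) (by omega)
                  rwa [show T.length - 1 - 1 = T.length - 1 - 1 from rfl] at h)
              (Or.inl (by omega)))
            (fun m hm1 hm2 hm3 =>
              natEnd_false_of_right T m (by omega)
                (by have h := hasc (m + 1) (by omega) (by omega)
                    rwa [show m + 1 - 1 = m from by omega] at h)),
          map_get_single]
        simp [pvRuns, h3]
    · constructor
      · rw [filter_range_nil (T.length - ln) T.length
            (sprAltIsStart T (T.length : Int)) (natStart T) (isStart_eval T)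
            (fun m hm1 hm2 => natStart_false_of_len T m (by omega))]
        simp [pvRuns, h3]
      · rw [filter_range_nil (T.length - ln) T.length
            (sprAltIsEnd T (T.length : Int)) (natEnd T) (isEnd_eval T) ?hEndsNil]
        · simp [pvRuns, h3]
        case hEndsNil =>
          intro m hm1 hm2
          by_cases hm0 : m < 2
          · exact natEnd_false_of_small T m hm0
          · by_cases hmc : m = T.length - ln
            · rcases hlm with h | h
              · omega
              · exact natEnd_false_of_mid T m (by rw [hmc]; exact not_lt.mpr h)
            · have hm' : m = T.length - ln + 1 ∧ ln = 2 := by omega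
              rcases hlm with h | h
              · omega
              · refine natEnd_false_of_left T m ?_
                rw [show m - 2 = T.length - ln - 1 from by omega,
                    show m - 1 = T.length - ln from by omega]
                exact not_lt.mpr h
  | succ k ih =>
    intro i ln hik h1 hli hasc hlm
    have hilt : i < T.length := by omega
    have hdrop : T.drop i = T[i] :: T.drop (i + 1) := List.drop_eq_getElem_cons hilt
    have hgdi : T.getD i 0 = T[i] := by
      rw [List.getD_eq_getElem?_getD, List.getElem?_eq_getElem hilt, Option.getD_some]
    rw [hdrop]
    by_cases hlt : T.getD (i - 1) 0 < T[i]
    · -- the run extends through index i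
      have hpv : pvRuns (T[i] :: T.drop (i + 1)) (T.getD (i - ln) 0) (T.getD (i - 1) 0) ln
          = pvRuns (T.drop (i + 1)) (T.getD (i - ln) 0) T[i] (ln + 1) := by
        simp only [pvRuns, if_pos hlt]
      rw [hpv]
      have hIH := ih (i + 1) (ln + 1) (by omega) (by omega) (by omega)
        (by intro j hj1 hj2
            by_cases hji : j = i
            · subst hji; rw [hgdi]; exact hlt
            · exact hasc j (by omega) (by omega))
        (by rw [show i + 1 - (ln + 1) = i - ln from by omega]; exact hlm)
      rw [show i + 1 - (ln + 1) = i - ln from by omega,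
          show i + 1 - 1 = i from by omega, hgdi] at hIH
      exact hIH
    · -- the run breaks at index i
      have hpv : pvRuns (T[i] :: T.drop (i + 1)) (T.getD (i - ln) 0) (T.getD (i - 1) 0) ln
          = (if 3 ≤ ln then [(T.getD (i - ln) 0, T.getD (i - 1) 0)] else [])
              ++ pvRuns (T.drop (i + 1)) T[i] T[i] 1 := by
        simp only [pvRuns, if_neg hlt]
      rw [hpv]
      have hIH := ih (i + 1) 1 (by omega) (le_refl 1) (by omega)
        (by intro j hj1 hj2; omega)
        (by right
            rw [show i + 1 - 1 = i from by omega]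
            rw [hgdi]
            exact not_lt.mp hlt)
      rw [show i + 1 - 1 = i from by omega, hgdi] at hIH
      have hsplitS : (PySem.List.pyRange ((i - ln : Nat) : Int) (T.length : Int) 1)
          = PySem.List.pyRange ((i - ln : Nat) : Int) ((i : Nat) : Int) 1
            ++ PySem.List.pyRange ((i : Nat) : Int) (T.length : Int) 1 :=
        PySem.List.pyRange_one_append _ _ _ (by exact_mod_cast Nat.sub_le i ln)
          (by exact_mod_cast le_of_lt hilt)
      rw [hsplitS]
      simp only [List.filter_append, List.map_append]
      by_cases h3 : 3 ≤ ln
      · constructor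
        · rw [filter_range_single (i - ln) i (i - ln)
              (sprAltIsStart T (T.length : Int)) (natStart T) (isStart_eval T)
              (le_refl _) (by omega)
              (natStart_true T _ (by omega) hlm
                (by have h := hasc (i - ln + 1) (by omega) (by omega)
                    rwa [show i - ln + 1 - 1 = i - ln from by omega] at h)
                (by have h := hasc (i - ln + 2) (by omega) (by omega)
                    rwa [show i - ln + 2 - 1 = i - ln + 1 from by omega] at h))
              (fun m hm1 hm2 hm3 =>
                natStart_false_of_asc T m (by omega) (hasc m (by omega) (by omega))),
            map_get_single, hIH.1, if_pos h3]
          simp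
        · rw [filter_range_single (i - ln) i (i - 1)
              (sprAltIsEnd T (T.length : Int)) (natEnd T) (isEnd_eval T)
              (by omega) (by omega)
              (natEnd_true T _ (by omega)
                (by have h := hasc (i - 2) (by omega) (by omega)
                    rwa [show i - 2 - 1 = i - 1 - 2 from by omega,
                         show i - 2 = i - 1 - 1 from by omega] at h)
                (by have h := hasc (i - 1) (by omega) (by omega)
                    exact h)
                (Or.inr (by rw [show i - 1 + 1 = i from by omega, hgdi]
                            exact not_lt.mp hlt)))
              (fun m hm1 hm2 hm3 =>
                natEnd_false_of_right T m (by omega)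
                  (by have h := hasc (m + 1) (by omega) (by omega)
                      rwa [show m + 1 - 1 = m from by omega] at h)),
            map_get_single, hIH.2, if_pos h3]
          simp
      · constructor
        · rw [filter_range_nil (i - ln) i
              (sprAltIsStart T (T.length : Int)) (natStart T) (isStart_eval T) ?hSN]
          · rw [hIH.1, if_neg h3]
            simp
          case hSN =>
            intro m hm1 hm2
            by_cases hmi : m = i - 1
            · refine natStart_false_of_flat1 T m ?_
              rw [show m + 1 = i from by omega, hmi, hgdi]
              exact hlt
            · have hm' : ln = 2 ∧ m = i - 2 := by omega
              refine natStart_false_of_flat2 T m ?_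
              rw [show m + 1 = i - 1 from by omega, show m + 2 = i from by omega, hgdi]
              exact hlt
        · rw [filter_range_nil (i - ln) i
              (sprAltIsEnd T (T.length : Int)) (natEnd T) (isEnd_eval T) ?hEN]
          · rw [hIH.2, if_neg h3]
            simp
          case hEN =>
            intro m hm1 hm2
            by_cases hm0 : m < 2
            · exact natEnd_false_of_small T m hm0
            · by_cases hmc : m = i - ln
              · rcases hlm with h | h
                · omega
                · exact natEnd_false_of_mid T m (by rw [hmc]; exact not_lt.mpr h)
              · have hm' : m = i - ln + 1 ∧ ln = 2 := by omega
                rcases hlm with h | h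
                · omega
                · refine natEnd_false_of_left T m ?_
                  rw [show m - 2 = i - ln - 1 from by omega,
                      show m - 1 = i - ln from by omega]
                  exact not_lt.mpr h

-- ===== B's final expression over run lists =====
lemma final_eq (rs : List (Int × Int)) :
    (!(rs.map Prod.fst).isEmpty && !(rs.map Prod.snd).isEmpty &&
      (match PySem.List.max? (rs.map Prod.fst) id, PySem.List.min? (rs.map Prod.snd) id with
       | some a, some b => decide (a > b)
       | _, _ => false)) = cmpRuns rs := by
  cases rs with
  | nil => rfl
  | cons p t =>
    simp only [List.isEmpty_map, List.isEmpty_cons, Bool.not_false, Bool.true_and]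
    unfold cmpRuns maxStarts minEnds
    generalize PySem.List.max? ((p :: t).map Prod.fst) id = q1
    generalize PySem.List.min? ((p :: t).map Prod.snd) id = q2
    cases q1 <;> cases q2 <;> simp

-- ===== VERDICT (by name: the statement is the Claim_ definition above) =====
theorem spr_spec : Claim_equal_spr := by
  intro T _
  unfold Spec_spr
  cases T with
  | nil => rfl
  | cons t0 rest =>
    have hA := spr_main (t0 :: rest) rest.length 1 1 t0 t0 []
      (by simp [Nat.add_comm]) (le_refl 1) (le_refl 1) (by simp) (by simp)
    rw [show maxStarts [] = none from rfl, show minEnds [] = none from rfl,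
      List.nil_append] at hA
    have hB := filt_main (t0 :: rest) rest.length 1 1
      (by simp [Nat.add_comm]) (le_refl 1) (le_refl 1)
      (by intro j h1 h2; omega) (Or.inl rfl)
    simp only [Nat.sub_self, Nat.cast_zero, List.drop_succ_cons, List.drop_zero,
      List.getD_cons_zero] at hB
    simp only [Nat.cast_one, List.drop_succ_cons, List.drop_zero] at hA
    unfold spr
    rw [hA]
    simp only [spr_alt]
    rw [hB.1, hB.2, final_eq]
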